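-- pv_equiv track=rewrite | github.com/joshanashakya/dissertation | workspace/dataset/java-python/GeeksForGeeks/590/A/2.py | solve
-- ===== SOURCE A (Python) =====
-- def solve( low, high, T ):
--
--     while low <= high:
--         mid = int((low + high) / 2)
--
--         # if mid is solution to equation
--         if (mid * (mid + 1)) == T:
--             return mid
--
--         # if our solution to equation
--         # lies between mid and mid-1
--         if (mid > 0 and (mid * (mid + 1)) > T
--                 and (mid * (mid - 1)) <= T) :
--             return mid - 1
--
--         # if solution to equation is
--         # greater than mid
--         if (mid * (mid + 1)) > T:
--             high = mid - 1;
--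
--         # if solution to equation is
--         # less than mid
--         else:
--             low = mid + 1
--     return -1
-- ===== SOURCE B (Python) =====
-- def solve(low, high, T):
--     def search(lo, hi):
--         if hi < lo:
--             return -1
--         m = int((lo + hi) / 2)
--         v = m * m + m
--         if v < T:
--             return search(m + 1, hi)
--         if v > T:
--             # m*(m-1) <= T  rewritten as  v <= T + 2*m
--             if m >= 1 and v <= T + 2 * m:
--                 return m - 1
--             return search(lo, m - 1)
--         return m
--     return search(low, high)
-- ===== Notes on version B (the rewrite author's own statement) =====
-- stated objective: alternative
-- what changed: Replaced the three-branch while loop by a nested recursive helper search(lo, hi) with T captured once: the equation value v = m*m + m is computed a single time, the branches are tested in the opposite order (v < T first), and the 'answer lies between m-1 and m' test is rephrased as v <= T + 2*m.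
import Mathlib
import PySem

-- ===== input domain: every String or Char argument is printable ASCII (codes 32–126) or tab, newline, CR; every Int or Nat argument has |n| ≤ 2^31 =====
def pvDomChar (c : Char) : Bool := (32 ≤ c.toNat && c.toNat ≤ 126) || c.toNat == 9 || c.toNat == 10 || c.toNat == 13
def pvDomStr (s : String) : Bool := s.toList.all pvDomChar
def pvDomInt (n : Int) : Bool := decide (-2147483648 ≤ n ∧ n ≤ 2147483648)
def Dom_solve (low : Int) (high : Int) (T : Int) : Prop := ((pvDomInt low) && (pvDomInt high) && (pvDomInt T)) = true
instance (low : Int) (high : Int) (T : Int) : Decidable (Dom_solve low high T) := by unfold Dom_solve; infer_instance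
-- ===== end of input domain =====

-- B rewrites A's while-loop binary search as a nested recursive helper over (lo, hi) that
-- fixes T once, computes the equation value v = m*m + m a single time, tests the three
-- outcomes in the opposite order (v < T / v > T / exact hit) and phrases the
-- 'between m-1 and m' test as v ≤ T + 2*m: same values, a different decomposition
-- (objective: alternative).

-- port A's termination lemma (cited by decreasing_by): the midpoint stays in [low, high].
-- Python's int((low+high)/2) truncates toward zero (exact on Dom, |sum| ≤ 2^32 < 2^53) = Int.tdiv.
theorem pv_mid_bounds (low high : Int) (h : low ≤ high) :
    low ≤ (low + high).tdiv 2 ∧ (low + high).tdiv 2 ≤ high := by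
  rw [Int.tdiv_eq_ediv]
  simp only [Int.sign]
  split <;> omega

-- ===== PORT A =====
-- the 'while low <= high' loop, state (low, high) as parameters of the tail-recursive helper
def solveLoop (low : Int) (high : Int) (T : Int) : Int :=
  if _h : low ≤ high then
    let mid := (low + high).tdiv 2     -- mid = int((low + high) / 2)
    if mid * (mid + 1) = T then mid
    else if mid > 0 ∧ mid * (mid + 1) > T ∧ mid * (mid - 1) ≤ T then mid - 1
    else if mid * (mid + 1) > T then solveLoop low (mid - 1) T   -- high = mid - 1
    else solveLoop (mid + 1) high T                              -- low = mid + 1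
  else -1
termination_by (high + 1 - low).toNat
decreasing_by
  · have := pv_mid_bounds low high (by omega); omega
  · have := pv_mid_bounds low high (by omega); omega

def solve (low : Int) (high : Int) (T : Int) : Int := solveLoop low high T

-- ===== PORT B =====
-- B's termination lemma: if the interval is nonempty its midpoint lies inside it.
theorem pv_b_mid_in (lo hi : Int) (hne : ¬ hi < lo) :
    lo ≤ (lo + hi).tdiv 2 ∧ (lo + hi).tdiv 2 ≤ hi := by
  rw [Int.tdiv_eq_ediv]
  simp only [Int.sign]
  split <;> omega

-- Source B's inner 'search(lo, hi)' helper, with T fixed as first argument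
def searchB (t : Int) (lo : Int) (hi : Int) : Int :=
  if _hempty : hi < lo then -1
  else
    let m := (lo + hi).tdiv 2          -- m = int((lo + hi) / 2)
    let v := m * m + m                 -- v = m * m + m
    if v < t then searchB t (m + 1) hi
    else if v > t then
      if 1 ≤ m ∧ v ≤ t + 2 * m then m - 1
      else searchB t lo (m - 1)
    else m
termination_by (hi + 1 - lo).toNat
decreasing_by
  · have := pv_b_mid_in lo hi (by omega); omega
  · have := pv_b_mid_in lo hi (by omega); omega

def solve_alt (low : Int) (high : Int) (T : Int) : Int := searchB T low high

-- ===== PRECONDITION & SPEC =====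
def Spec_solve (low : Int) (high : Int) (T : Int) (out : Int) : Prop := out = solve_alt low high T
instance (low : Int) (high : Int) (T : Int) (out : Int) : Decidable (Spec_solve low high T out) := by unfold Spec_solve; infer_instance

-- ===== CLAIM (what is proved, stated in full; the proofs are below) =====
def Claim_equal_solve : Prop := ∀ (low : Int) (high : Int) (T : Int), Dom_solve low high T → Spec_solve low high T (solve low high T)

-- ===== LEMMAS AND PROOFS =====
theorem loop_eq_search (n : Nat) : ∀ (low high T : Int), (high + 1 - low).toNat = n →
    solveLoop low high T = searchB T low high := by
  induction n using Nat.strong_induction_on with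
  | _ n ih =>
    intro low high T hn
    rw [solveLoop, searchB]
    by_cases h : low ≤ high
    · simp only [h, dif_pos, show ¬ high < low by omega, dif_neg, not_false_iff]
      have hb := pv_mid_bounds low high h
      set mid := (low + high).tdiv 2 with hmid
      change (if mid * (mid + 1) = T then mid
          else if mid > 0 ∧ mid * (mid + 1) > T ∧ mid * (mid - 1) ≤ T then mid - 1
          else if mid * (mid + 1) > T then solveLoop low (mid - 1) T
          else solveLoop (mid + 1) high T)
        = (if mid * mid + mid < T then searchB T (mid + 1) high
          else if mid * mid + mid > T then
            if 1 ≤ mid ∧ mid * mid + mid ≤ T + 2 * mid then mid - 1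
            else searchB T low (mid - 1)
          else mid)
      rcases lt_trichotomy (mid * mid + mid) T with hlt | heq | hgt
      · rw [if_neg (show ¬ mid * (mid + 1) = T by intro hc; nlinarith),
          if_neg (show ¬ (mid > 0 ∧ mid * (mid + 1) > T ∧ mid * (mid - 1) ≤ T) by
            rintro ⟨_, h2, _⟩; nlinarith),
          if_neg (show ¬ mid * (mid + 1) > T by intro h2; nlinarith), if_pos hlt]
        exact ih _ (by omega) _ _ _ rfl
      · rw [if_pos (show mid * (mid + 1) = T by linear_combination heq),
          if_neg (show ¬ mid * mid + mid < T by rw [heq]; exact lt_irrefl T),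
          if_neg (show ¬ mid * mid + mid > T by rw [heq]; exact lt_irrefl T)]
      · rw [if_neg (show ¬ mid * (mid + 1) = T by intro hc; nlinarith),
          if_neg (show ¬ mid * mid + mid < T by nlinarith), if_pos hgt]
        by_cases hbtw : 1 ≤ mid ∧ mid * mid + mid ≤ T + 2 * mid
        · rw [if_pos (show mid > 0 ∧ mid * (mid + 1) > T ∧ mid * (mid - 1) ≤ T from
            ⟨by omega, by nlinarith, by nlinarith⟩), if_pos hbtw]
        · rw [if_neg (show ¬ (mid > 0 ∧ mid * (mid + 1) > T ∧ mid * (mid - 1) ≤ T) by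
              rintro ⟨h1, _, h3⟩; exact hbtw ⟨by omega, by nlinarith⟩),
            if_pos (show mid * (mid + 1) > T by nlinarith), if_neg hbtw]
          exact ih _ (by omega) _ _ _ rfl
    · simp [show high < low by omega, show ¬ low ≤ high from h]

-- ===== VERDICT (by name: the statement is the Claim_ definition above) =====
theorem solve_spec : Claim_equal_solve := by
  intro low high T _
  unfold Spec_solve solve solve_alt
  exact loop_eq_search _ low high T rfl
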